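-- pv_equiv track=rewrite | github.com/pabdominguez98/algo-1 | diccionarios/1.py | ordenar_valores_por_longitud
-- ===== SOURCE A (Python) =====
-- def ordenar_valores_por_longitud(diccionario):
--     string_list = list(diccionario.values())
--     for i in range (1, len(string_list)):
--         for j in range (0, len(string_list) - i):
--             if (len(string_list[j]) < len(string_list[j+1])):
--                 aux = string_list[j]
--                 string_list[j] = string_list[j+1]
--                 string_list[j+1] = aux
--
--     return string_list
-- ===== SOURCE B (Python) =====
-- def ordenar_valores_por_longitud(diccionario):
--     # Bucket sort: group values by length, then emit buckets from longest
--     # length to shortest.  Appending in iteration order keeps ties stable,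
--     # matching the bubble sort's stable descending order.
--     buckets = {}
--     for v in diccionario.values():
--         buckets.setdefault(len(v), []).append(v)
--     result = []
--     for L in sorted(buckets, reverse=True):
--         result.extend(buckets[L])
--     return result
-- ===== Notes on version B (the rewrite author's own statement) =====
-- stated objective: faster
-- what changed: Replaces the quadratic bubble sort over the values with a single-pass bucket sort: values are grouped by length in one dict pass and the buckets are concatenated from the largest length down, which preserves the bubble sort's stable descending order.
import Mathlib
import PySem

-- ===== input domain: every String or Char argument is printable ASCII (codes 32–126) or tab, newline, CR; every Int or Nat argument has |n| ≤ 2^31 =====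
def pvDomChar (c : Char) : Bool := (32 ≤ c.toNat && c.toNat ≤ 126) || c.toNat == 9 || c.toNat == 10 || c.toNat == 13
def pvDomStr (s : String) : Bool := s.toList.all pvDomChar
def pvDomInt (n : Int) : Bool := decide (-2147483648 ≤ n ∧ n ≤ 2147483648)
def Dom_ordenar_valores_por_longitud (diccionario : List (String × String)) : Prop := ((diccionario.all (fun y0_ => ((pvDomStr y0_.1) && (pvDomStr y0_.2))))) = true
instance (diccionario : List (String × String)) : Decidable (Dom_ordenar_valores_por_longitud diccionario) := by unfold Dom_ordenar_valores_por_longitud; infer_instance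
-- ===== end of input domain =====

-- B replaces A's quadratic bubble sort of the dict's values (descending by string
-- length) with a one-pass bucket sort by length; same return value.

-- ===== PORT A =====
-- the body of A's inner loop: the compare-and-swap at positions j, j+1.
-- j comes from range(0, len-i), so 0 ≤ j and j+1 < len: pyGetD's default is never
-- used and `.set j.toNat` is Python's `string_list[j] = …` exactly (index in range).
def pvSwapStep (t : List String) (j : Int) : List String :=
  if PySem.Str.len (PySem.List.pyGetD t j "") < PySem.Str.len (PySem.List.pyGetD t (j+1) "") then
    let aux := PySem.List.pyGetD t j ""
    (t.set j.toNat (PySem.List.pyGetD t (j+1) "")).set (j+1).toNat aux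
  else t

def ordenar_valores_por_longitud (diccionario : List (String × String)) : List String :=
  let string_list := (PySem.Dict.ofList diccionario).values
  (PySem.List.pyRange 1 (string_list.length : Int)).foldl
    (fun t i => (PySem.List.pyRange 0 ((t.length : Int) - i)).foldl pvSwapStep t)
    string_list

-- ===== PORT B =====
def ordenar_valores_por_longitud_alt (diccionario : List (String × String)) : List String :=
  let buckets : PySem.Dict Int (List String) :=
    ((PySem.Dict.ofList diccionario).values).foldl
      (fun b v => b.modify (PySem.Str.len v) [] (fun l => l ++ [v])) PySem.Dict.empty
  -- for L in sorted(buckets, reverse=True): result.extend(buckets[L])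
  -- (L ranges over the dict's own keys, so `buckets[L]` never raises: getD is exact)
  (PySem.List.sorted buckets.keys (fun L => L) true).foldl
    (fun res L => res ++ buckets.getD L []) []

-- ===== PRECONDITION & SPEC =====
def Spec_ordenar_valores_por_longitud (diccionario : List (String × String)) (out : List String) : Prop := out = ordenar_valores_por_longitud_alt diccionario
instance (diccionario : List (String × String)) (out : List String) : Decidable (Spec_ordenar_valores_por_longitud diccionario out) := by unfold Spec_ordenar_valores_por_longitud; infer_instance

-- ===== CLAIM (what is proved, stated in full; the proofs are below) =====
def Claim_equal_ordenar_valores_por_longitud : Prop := ∀ (diccionario : List (String × String)), Dom_ordenar_valores_por_longitud diccionario → Spec_ordenar_valores_por_longitud diccionario (ordenar_valores_por_longitud diccionario)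

-- ===== LEMMAS AND PROOFS =====

def pvK (v : String) : Int := PySem.Str.len v
def pvGo (x : String) : List String → List String
  | [] => [x]
  | y :: r => if pvK x < pvK y then y :: pvGo x r else x :: pvGo y r
def pvFiltEq (u v : List String) : Prop :=
  ∀ L : Int, u.filter (fun s => pvK s == L) = v.filter (fun s => pvK s == L)

theorem pvGo_length (x : String) (t : List String) : (pvGo x t).length = t.length + 1 := by
  induction t generalizing x with
  | nil => simp [pvGo]
  | cons y r ih => simp only [pvGo]; split <;> simp [ih]

theorem pvMem_go (a x : String) (t : List String) : a ∈ pvGo x t ↔ a = x ∨ a ∈ t := by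
  induction t generalizing x with
  | nil => simp [pvGo]
  | cons y r ih => simp only [pvGo]; split <;> simp [ih] <;> tauto

theorem pvGo_filter (x : String) (t : List String) : pvFiltEq (pvGo x t) (x :: t) := by
  induction t generalizing x with
  | nil => intro L; rfl
  | cons y r ih =>
    intro L
    simp only [pvGo]
    split
    · rename_i hlt
      have hne : pvK x ≠ pvK y := by omega
      have := ih x L
      by_cases hx : pvK x = L
      · have hy : ¬ pvK y = L := by omega
        simp [List.filter_cons, hx, hy, this]
      · by_cases hy : pvK y = L <;> simp [List.filter_cons, hx, hy, this]
    · have := ih y L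
      simp [List.filter_cons, this]


theorem pvGetLast_cons (x : String) (l : List String) (h : l ≠ []) :
    (x :: l).getLast? = l.getLast? := by
  cases l with
  | nil => exact absurd rfl h
  | cons z zs => simp [List.getLast?_cons]

theorem pvGo_last_min (x : String) (t : List String) (c : String)
    (h : (pvGo x t).getLast? = some c) : ∀ a ∈ x :: t, pvK c ≤ pvK a := by
  induction t generalizing x with
  | nil => simp [pvGo] at h; subst h; simp
  | cons y r ih =>
    simp only [pvGo] at h
    split at h
    · rename_i hlt
      have hne : (pvGo x r) ≠ [] := by
        intro hn; have := pvGo_length x r; simp [hn] at this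
      rw [pvGetLast_cons _ _ hne] at h
      have := ih x h
      intro a ha
      rcases List.mem_cons.1 ha with rfl | ha
      · exact this a (by simp)
      rcases List.mem_cons.1 ha with rfl | ha
      · have h1 := this x (by simp); omega
      · exact this a (by simp [ha])
    · rename_i hge
      have hne : (pvGo y r) ≠ [] := by
        intro hn; have := pvGo_length y r; simp [hn] at this
      rw [pvGetLast_cons _ _ hne] at h
      have := ih y h
      intro b hb
      rcases List.mem_cons.1 hb with rfl | hb
      · have h1 := this y (by simp); omega
      rcases List.mem_cons.1 hb with rfl | hb
      · exact this b (by simp)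
      · exact this b (by simp [hb])

def pvSortedDesc (u : List String) : Prop := u.Pairwise (fun a b => pvK b ≤ pvK a)

theorem pvFilt_self_ne_nil (a : String) (t : List String) :
    (a :: t).filter (fun s => pvK s == pvK a) ≠ [] := by
  simp [List.filter_cons]

theorem pvUnique (u v : List String) (hu : pvSortedDesc u) (hv : pvSortedDesc v)
    (hf : pvFiltEq u v) : u = v := by
  induction u generalizing v with
  | nil =>
    cases v with
    | nil => rfl
    | cons b t => exact absurd ((hf (pvK b)).symm) (by simpa using pvFilt_self_ne_nil b t)
  | cons a u' ih =>
    cases v with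
    | nil => exact absurd (hf (pvK a)) (by simpa using pvFilt_self_ne_nil a u')
    | cons b v' =>
      have hav : a ∈ b :: v' := by
        have := hf (pvK a)
        have ha : a ∈ (a :: u').filter (fun s => pvK s == pvK a) := by simp
        rw [this] at ha
        exact List.mem_of_mem_filter ha
      have hbu : b ∈ a :: u' := by
        have := hf (pvK b)
        have hb : b ∈ (b :: v').filter (fun s => pvK s == pvK b) := by simp
        rw [← this] at hb
        exact List.mem_of_mem_filter hb
      have hab : pvK a = pvK b := by
        have h1 : pvK a ≤ pvK b := by
          rcases List.mem_cons.1 hav with rfl | h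
          · rfl
          · have := (List.pairwise_cons.1 hv).1 a h; omega
        have h2 : pvK b ≤ pvK a := by
          rcases List.mem_cons.1 hbu with rfl | h
          · rfl
          · have := (List.pairwise_cons.1 hu).1 b h; omega
        omega
      have hfa := hf (pvK a)
      rw [List.filter_cons, List.filter_cons] at hfa
      simp only [BEq.rfl, hab.symm ▸ (rfl : pvK a = pvK a)] at hfa
      have hba : (pvK b == pvK a) = true := by simp [hab]
      rw [if_pos (by simp)] at hfa
      rw [if_pos (by simp [hba])] at hfa
      have heq : a = b := by exact List.head_eq_of_cons_eq hfa
      subst heq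
      have htail : pvFiltEq u' v' := by
        intro L
        have := hf L
        rw [List.filter_cons, List.filter_cons] at this
        by_cases hL : (pvK a == L) = true
        · rw [if_pos hL, if_pos hL] at this; exact List.tail_eq_of_cons_eq this
        · rw [if_neg hL, if_neg hL] at this; exact this
      rw [ih v' (List.pairwise_cons.1 hu).2 (List.pairwise_cons.1 hv).2 htail]

-- bucket dict abbreviation (proof-side)
def pvBuckets (xs : List String) : PySem.Dict Int (List String) :=
  xs.foldl (fun b v => b.modify (PySem.Str.len v) [] (fun l => l ++ [v])) PySem.Dict.empty

theorem pvBuckets_getD (xs : List String) (d : PySem.Dict Int (List String)) (L : Int) :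
    (xs.foldl (fun b v => b.modify (PySem.Str.len v) [] (fun l => l ++ [v])) d).getD L []
      = d.getD L [] ++ xs.filter (fun s => pvK s == L) := by
  induction xs generalizing d with
  | nil => simp
  | cons v rest ih =>
    simp only [List.foldl_cons, ih, List.filter_cons]
    rw [PySem.Dict.getD_modify]
    by_cases h : L = PySem.Str.len v
    · simp [h, pvK, List.append_assoc]
    · rw [if_neg h]
      have : (pvK v == L) = false := by
        simp only [pvK, beq_eq_false_iff_ne, ne_eq]
        omega
      simp [this]

theorem pvBuckets_keys (xs : List String) :
    (pvBuckets xs).keys = PySem.Set.ofList (xs.map (fun s => pvK s)) := by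
  unfold pvBuckets
  rw [PySem.Dict.keys_foldl_modify_key xs (fun v => PySem.Str.len v) [] (fun _ v l => l ++ [v])]
  rw [PySem.Dict.keys_empty, PySem.Set.ofList_eq_foldl]
  rfl

theorem pvFlat_sorted (xs : List String) (Ls : List Int) (hdesc : Ls.Pairwise (fun a b => b < a)) :
    pvSortedDesc (Ls.flatMap (fun L => xs.filter (fun s => pvK s == L))) := by
  induction Ls with
  | nil => exact List.Pairwise.nil
  | cons L Ls' ih =>
    simp only [List.flatMap_cons]
    unfold pvSortedDesc
    rw [List.pairwise_append]
    obtain ⟨hL, htail⟩ := List.pairwise_cons.1 hdesc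
    refine ⟨?_, ih htail, ?_⟩
    · apply List.pairwise_of_forall_mem_list
      intro a ha b hb
      have h1 : pvK a = L := by simpa using (List.of_mem_filter ha)
      have h2 : pvK b = L := by simpa using (List.of_mem_filter hb)
      omega
    · intro a ha b hb
      have h1 : pvK a = L := by simpa using (List.of_mem_filter ha)
      obtain ⟨L', hL', hbL'⟩ := List.mem_flatMap.1 hb
      have h2 : pvK b = L' := by simpa using (List.of_mem_filter hbL')
      have := hL L' hL'
      omega

theorem pvFlat_filter (xs : List String) (Ls : List Int) (hnd : Ls.Nodup) (L0 : Int) :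
    (Ls.flatMap (fun L => xs.filter (fun s => pvK s == L))).filter (fun s => pvK s == L0)
      = if L0 ∈ Ls then xs.filter (fun s => pvK s == L0) else [] := by
  induction Ls with
  | nil => simp
  | cons L Ls' ih =>
    obtain ⟨hL, hnd'⟩ := List.nodup_cons.1 hnd
    simp only [List.flatMap_cons, List.filter_append, ih hnd']
    by_cases h : L0 = L
    · subst h
      rw [List.filter_filter]
      simp only [List.mem_cons, true_or, if_pos]
      rw [if_neg hL]
      have : ∀ s, ((pvK s == L0) && (pvK s == L0)) = (pvK s == L0) := by intro s; cases hb : (pvK s == L0) <;> simp [hb]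
      simp [this]
    · rw [List.filter_filter]
      have hff : ∀ s, ((pvK s == L0) && (pvK s == L)) = false := by
        intro s
        by_cases hs : pvK s = L0
        · simp [hs]; omega
        · simp [hs]
      simp only [hff]
      simp [List.filter_false, h]

theorem pvB_core' (xs : List String) :
    pvSortedDesc ((PySem.List.sorted (pvBuckets xs).keys (fun L => L) true).foldl
        (fun res L => res ++ (pvBuckets xs).getD L []) [])
    ∧ pvFiltEq ((PySem.List.sorted (pvBuckets xs).keys (fun L => L) true).foldl
        (fun res L => res ++ (pvBuckets xs).getD L []) []) xs := by
  have hflat := PySem.List.foldl_append_eq_flatMap (fun L => (pvBuckets xs).getD L [])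
      (PySem.List.sorted (pvBuckets xs).keys (fun L => L) true) []
  set Ls := PySem.List.sorted (pvBuckets xs).keys (fun L => L) true with hLs
  have hgetD : ∀ L, (pvBuckets xs).getD L [] = xs.filter (fun s => pvK s == L) := by
    intro L
    have := pvBuckets_getD xs PySem.Dict.empty L
    simpa [pvBuckets] using this
  have hmemLs : ∀ L : Int, L ∈ Ls ↔ L ∈ xs.map (fun s => pvK s) := by
    intro L
    rw [hLs, PySem.List.mem_sorted, pvBuckets_keys, PySem.Set.mem_ofList]
  have hnodup : Ls.Nodup := by
    have hperm := PySem.List.sorted_perm (pvBuckets xs).keys (fun L => L) true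
    have hk : (pvBuckets xs).keys.Nodup := by
      rw [pvBuckets_keys]; exact PySem.Set.nodup_ofList _
    exact hperm.symm.nodup hk
  have hdesc : Ls.Pairwise (fun a b => b < a) := by
    have h1 : Ls.Pairwise (fun a b : Int => b ≤ a) := by
      simpa using PySem.List.sorted_pairwise_rev (pvBuckets xs).keys (fun L => L)
    have := List.Pairwise.and h1 (List.Pairwise.imp (fun h => h) hnodup)
    exact this.imp (fun ⟨h1, h2⟩ => lt_of_le_of_ne h1 (Ne.symm h2))
  rw [hflat]
  simp only [List.nil_append]
  have hcongr : Ls.flatMap (fun L => (pvBuckets xs).getD L [])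
      = Ls.flatMap (fun L => xs.filter (fun s => pvK s == L)) := by
    apply List.flatMap_congr <;> intro L _ <;> exact hgetD L
  rw [hcongr]
  constructor
  · exact pvFlat_sorted xs Ls hdesc
  · intro L0
    rw [pvFlat_filter xs Ls hnodup L0]
    by_cases hin : L0 ∈ Ls
    · rw [if_pos hin]
    · rw [if_neg hin]
      symm
      rw [List.filter_eq_nil_iff]
      intro s hs
      intro hk
      apply hin
      rw [hmemLs]
      have : pvK s = L0 := by simpa using hk
      exact this ▸ List.mem_map_of_mem hs
def pvPass : List String → List String
  | [] => []
  | x :: r => pvGo x r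

theorem pvStep_zero (x y : String) (r : List String) :
    pvSwapStep (x :: y :: r) 0
      = if PySem.Str.len x < PySem.Str.len y then y :: x :: r else x :: y :: r := by
  have h0 : PySem.List.pyGetD (x :: y :: r) 0 "" = x := by
    simpa using PySem.List.pyGetD_natCast (x :: y :: r) 0 ""
  have h1 : PySem.List.pyGetD (x :: y :: r) (0 + 1) "" = y := by
    simpa using PySem.List.pyGetD_natCast (x :: y :: r) 1 ""
  simp only [pvSwapStep, h0, h1]
  split <;> rfl

theorem pvStep_shift (w : String) (z : List String) (j : Int) (hj : 0 ≤ j) :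
    pvSwapStep (w :: z) (j + 1) = w :: pvSwapStep z j := by
  lift j to ℕ using hj
  simp only [pvSwapStep]
  rw [show ((j : Int) + 1 + 1) = ((j + 2 : Nat) : Int) by push_cast; ring]
  rw [show ((j : Int) + 1) = ((j + 1 : Nat) : Int) by push_cast; ring]
  simp only [PySem.List.pyGetD_natCast, Int.toNat_natCast, List.getD_cons_succ,
    List.set_cons_succ]
  split <;> simp

theorem pvFold_shift (js : List Int) (hjs : ∀ j ∈ js, 1 ≤ j) (w : String) (z : List String) :
    js.foldl pvSwapStep (w :: z) = w :: (js.map (fun j => j - 1)).foldl pvSwapStep z := by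
  induction js generalizing z with
  | nil => simp
  | cons j js' ih =>
    have h1 : 1 ≤ j := hjs j (by simp)
    have hstep : pvSwapStep (w :: z) j = w :: pvSwapStep z (j - 1) := by
      have := pvStep_shift w z (j - 1) (by omega)
      simpa using this
    simp only [List.foldl_cons, List.map_cons, hstep]
    exact ih (fun j hj => hjs j (by simp [hj])) _

theorem pvRange_shift (m : Nat) :
    (PySem.List.pyRange 1 ((m : Int) + 1)).map (fun j => j - 1) = PySem.List.pyRange 0 (m : Int) := by
  rw [PySem.List.pyRange_of_pos 1 ((m : Int) + 1) (by norm_num),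
      PySem.List.pyRange_of_pos 0 (m : Int) (by norm_num)]
  by_cases hm : 0 < m
  · rw [if_pos (by exact_mod_cast Nat.lt_add_of_pos_left hm ..), if_pos (by exact_mod_cast hm)]
    have e1 : (((m:Int) + 1 - 1 + 1 - 1) / 1).toNat = m := by simp
    have e2 : (((m:Int) - 0 + 1 - 1) / 1).toNat = m := by simp
    rw [e1, e2, List.map_map]
    apply List.map_congr_left
    intro k _
    simp only [Function.comp_apply]
    omega
  · rw [if_neg (by omega), if_neg (by omega)]
    simp

theorem pvRange_empty (b : Int) (h : b ≤ 0) : PySem.List.pyRange 0 b = [] := by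
  rw [PySem.List.pyRange_of_pos 0 b (by norm_num), if_neg (by omega)]
  simp

theorem pvInner_eq (m : Nat) (s : List String) (hm : m < s.length) :
    (PySem.List.pyRange 0 (m : Int)).foldl pvSwapStep s
      = pvPass (s.take (m + 1)) ++ s.drop (m + 1) := by
  induction m generalizing s with
  | zero =>
    rw [show ((0 : Nat) : Int) = 0 by norm_num, pvRange_empty 0 (by omega)]
    cases s with
    | nil => simp at hm
    | cons x r => simp [pvPass, pvGo]
  | succ m ih =>
    match s, hm with
    | x :: y :: r, hm =>
      have hsplit : PySem.List.pyRange 0 ((m + 1 : Nat) : Int)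
          = PySem.List.pyRange 0 1 ++ PySem.List.pyRange 1 ((m : Int) + 1) := by
        rw [← PySem.List.pyRange_one_append 0 1 ((m : Int) + 1) (by omega) (by omega)]
        norm_num
      have hone : PySem.List.pyRange 0 1 = [0] := by decide
      rw [hsplit, hone, List.foldl_append]
      simp only [List.foldl_cons, List.foldl_nil, pvStep_zero]
      have hmem : ∀ j ∈ PySem.List.pyRange 1 ((m : Int) + 1), 1 ≤ j := by
        intro j hj; exact (PySem.List.mem_pyRange_one.1 hj).1
      have hlen : m < (r.length + 1) := by simpa using Nat.lt_of_succ_lt_succ hm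
      by_cases hc : PySem.Str.len x < PySem.Str.len y
      · rw [if_pos hc, pvFold_shift _ hmem, pvRange_shift, ih (x :: r) (by simpa using hlen)]
        simp only [List.take_succ_cons, List.drop_succ_cons, pvPass, pvGo]
        have hc2 : x.length < y.length := by
          simp only [PySem.Str.len_eq, ← String.length_toList] at hc
          exact_mod_cast hc
        simp [pvK, hc, hc2]
      · rw [if_neg hc, pvFold_shift _ hmem, pvRange_shift, ih (y :: r) (by simpa using hlen)]
        simp only [List.take_succ_cons, List.drop_succ_cons, pvPass, pvGo]
        have hc2 : ¬ x.length < y.length := by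
          simp only [PySem.Str.len_eq, ← String.length_toList] at hc
          exact_mod_cast hc
        simp [pvK, hc, hc2]

def pvPassFun (t : List String) (i : Int) : List String :=
  (PySem.List.pyRange 0 ((t.length : Int) - i)).foldl pvSwapStep t
def pvSt (xs : List String) (c : Nat) : List String :=
  ((List.range c).map (fun (t : Nat) => 1 + (t : Int))).foldl pvPassFun xs

theorem pvRange_outer (n : Nat) :
    PySem.List.pyRange 1 (n : Int) = (List.range (n - 1)).map (fun (t : Nat) => 1 + (t : Int)) := by
  rw [PySem.List.pyRange_of_pos 1 (n : Int) (by norm_num)]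
  by_cases h : 1 < n
  · rw [if_pos (by exact_mod_cast h)]
    have : (((n : Int) - 1 + 1 - 1) / 1).toNat = n - 1 := by omega
    rw [this]
    apply List.map_congr_left
    intro k _
    omega
  · rw [if_neg (by omega)]
    have : n - 1 = 0 := by omega
    simp [this]

theorem pvInv (xs : List String) (c : Nat) (hc : c = 0 ∨ c < xs.length) :
    (pvSt xs c).length = xs.length
    ∧ pvFiltEq (pvSt xs c) xs
    ∧ ((pvSt xs c).drop (xs.length - c)).Pairwise (fun a b => pvK b ≤ pvK a)
    ∧ (∀ a ∈ (pvSt xs c).take (xs.length - c),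
        ∀ b ∈ (pvSt xs c).drop (xs.length - c), pvK b ≤ pvK a) := by
  induction c with
  | zero =>
    refine ⟨rfl, fun L => rfl, ?_, ?_⟩
    · simp [pvSt, List.drop_length]
    · simp [pvSt, List.drop_length]
  | succ c ih =>
    have hcn : c + 1 < xs.length := by
      rcases hc with h | h
      · exact absurd h (by omega)
      · exact h
    set n := xs.length with hn
    obtain ⟨ihlen, ihfilt, ihsort, ihmin⟩ := ih (Or.inr (by omega))
    set s := pvSt xs c with hs
    have hstep : pvSt xs (c + 1) = pvPassFun s (1 + c) := by
      rw [hs, pvSt, pvSt, List.range_succ, List.map_append, List.foldl_append]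
      rfl
    set m : Nat := n - c - 1 with hm
    have hcast : ((s.length : Int)) - (1 + c) = (m : Int) := by
      rw [ihlen]; omega
    have hmlt : m < s.length := by omega
    have hinner : pvSt xs (c + 1) = pvPass (s.take (m + 1)) ++ s.drop (m + 1) := by
      rw [hstep]; unfold pvPassFun
      rw [hcast]
      exact pvInner_eq m s hmlt
    have hm1 : m + 1 = n - c := by omega
    rw [hm1] at hinner
    set u := s.take (n - c) with hu'
    set v := s.drop (n - c) with hv'
    have hulen : u.length = n - c := by
      rw [hu', List.length_take, ihlen]; omega
    obtain ⟨a, u'', hu⟩ : ∃ a u'', u = a :: u'' := by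
      cases h : u with
      | nil => rw [h] at hulen; simp at hulen; omega
      | cons a u'' => exact ⟨a, u'', rfl⟩
    have hpass : pvPass u = pvGo a u'' := by rw [hu]; rfl
    have hpne : pvGo a u'' ≠ [] := by
      intro h; have := pvGo_length a u''; rw [h] at this; simp at this
    set c0 := (pvGo a u'').getLast hpne with hc0
    set p := (pvGo a u'').dropLast with hp
    have hdecomp : p ++ [c0] = pvGo a u'' := List.dropLast_append_getLast hpne
    have hplen : p.length = m := by
      have h1 := pvGo_length a u''
      have h2 : u''.length + 1 = n - c := by
        rw [hu] at hulen; simpa using hulen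
      rw [hp, List.length_dropLast, h1]; omega
    have hlast? : (pvGo a u'').getLast? = some c0 := List.getLast?_eq_getLast hpne
    have hS : pvSt xs (c + 1) = p ++ (c0 :: v) := by
      rw [hinner, hpass, ← hdecomp, List.append_assoc]
      rfl
    have hvlen : v.length = c := by
      rw [hv', List.length_drop, ihlen]; omega
    have hmem_go_u : ∀ w, w ∈ pvGo a u'' → w ∈ u := by
      intro w hw
      rw [hu]
      rcases (pvMem_go w a u'').1 hw with rfl | h
      · simp
      · simp [h]
    have hnc1 : n - (c + 1) = m := by omega
    have htake : (pvSt xs (c + 1)).take (n - (c + 1)) = p := by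
      rw [hS, hnc1]; exact List.take_left' hplen
    have hdrop : (pvSt xs (c + 1)).drop (n - (c + 1)) = c0 :: v := by
      rw [hS, hnc1]; exact List.drop_left' hplen
    refine ⟨?_, ?_, ?_, ?_⟩
    · rw [hS]
      simp only [List.length_append, List.length_cons, hplen, hvlen]
      omega
    · intro L
      rw [hinner, List.filter_append, hpass, pvGo_filter a u'' L]
      have : (a :: u'') = u := hu.symm
      rw [this, hu', hv', ← List.filter_append, List.take_append_drop]
      exact ihfilt L
    · rw [hdrop]
      refine List.pairwise_cons.2 ⟨?_, ihsort⟩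
      intro b hb
      exact ihmin c0 (hmem_go_u c0 (List.getLast_mem hpne)) b hb
    · intro a' ha' b hb
      rw [htake] at ha'
      have ha'go : a' ∈ pvGo a u'' := by
        rw [← hdecomp]; exact List.mem_append_left _ ha'
      rw [hdrop] at hb
      rcases List.mem_cons.1 hb with rfl | hb
      · exact pvGo_last_min a u'' c0 hlast? a' ((pvMem_go a' a u'').1 ha'go |>.elim (fun h => h ▸ List.mem_cons_self ..) (fun h => List.mem_cons_of_mem _ h))
      · exact ihmin a' (hmem_go_u a' ha'go) b hb

theorem pvA_core (xs : List String) :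
    pvSortedDesc ((PySem.List.pyRange 1 (xs.length : Int)).foldl
        (fun t i => (PySem.List.pyRange 0 ((t.length : Int) - i)).foldl pvSwapStep t) xs)
    ∧ pvFiltEq ((PySem.List.pyRange 1 (xs.length : Int)).foldl
        (fun t i => (PySem.List.pyRange 0 ((t.length : Int) - i)).foldl pvSwapStep t) xs) xs := by
  rw [pvRange_outer xs.length]
  show pvSortedDesc (pvSt xs (xs.length - 1)) ∧ pvFiltEq (pvSt xs (xs.length - 1)) xs
  by_cases hn : xs.length = 0
  · have hx : xs = [] := List.length_eq_zero_iff.1 hn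
    subst hx
    exact ⟨List.Pairwise.nil, fun L => rfl⟩
  · obtain ⟨hlen, hfilt, hsort, hmin⟩ := pvInv xs (xs.length - 1) (by omega)
    refine ⟨?_, hfilt⟩
    have h1 : xs.length - (xs.length - 1) = 1 := by omega
    rw [h1] at hsort hmin
    set s := pvSt xs (xs.length - 1) with hs
    have hslen : s.length = xs.length := hlen
    obtain ⟨hd, tl, hcons⟩ : ∃ hd tl, s = hd :: tl := by
      cases h : s with
      | nil => rw [h] at hslen; simp at hslen; omega
      | cons hd tl => exact ⟨hd, tl, rfl⟩
    rw [hcons]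
    unfold pvSortedDesc
    refine List.pairwise_cons.2 ⟨?_, ?_⟩
    · intro b hb
      exact hmin hd (by rw [hcons]; simp) b (by rw [hcons]; simpa using hb)
    · have := hsort
      rw [hcons] at this
      simpa using this

-- ===== VERDICT (by name: the statement is the Claim_ definition above) =====
theorem ordenar_valores_por_longitud_spec : Claim_equal_ordenar_valores_por_longitud := by
  intro d _
  show _ = _
  unfold ordenar_valores_por_longitud ordenar_valores_por_longitud_alt
  obtain ⟨ha1, ha2⟩ := pvA_core (PySem.Dict.ofList d).values
  obtain ⟨hb1, hb2⟩ := pvB_core' (PySem.Dict.ofList d).values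
  exact pvUnique _ _ ha1 hb1 (fun L => (ha2 L).trans (hb2 L).symm)
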